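-- pv_equiv track=rewrite | github.com/shubham184/fabric-deployment-mvp | archive/fabric-deployment-platform/src/deployment/validator.py | _check_resource_conflicts
-- ===== SOURCE A (Python) =====
-- from typing import List
--
-- def _check_resource_conflicts(customers: List[str], environment: str) -> bool:
--     """Check for potential resource naming conflicts."""
--     try:
--         # Check for duplicate customer prefixes or names
--         customer_prefixes = []
--         for customer in customers:
--             # This would load actual customer config to get prefix
--             # For now, use customer name as prefix
--             customer_prefixes.append(customer[:4])  # First 4 chars as prefix
--
--         # Check for duplicates
--         return len(customer_prefixes) == len(set(customer_prefixes))
--     except Exception: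
--         return True  # Assume no conflicts if check fails
-- ===== SOURCE B (Python) =====
-- from typing import List
--
-- def _check_resource_conflicts(customers: List[str], environment: str) -> bool:
--     """Check for potential resource naming conflicts."""
--     try:
--         prefixes = sorted(customer[:4] for customer in customers)
--         # sorted list: duplicates, if any, are adjacent
--         return all(x != y for x, y in zip(prefixes, prefixes[1:]))
--     except Exception:
--         return True  # Assume no conflicts if check fails
-- ===== Notes on version B (the rewrite author's own statement) =====
-- stated objective: alternative
-- what changed: Duplicate prefixes are detected by sorting the prefix list and scanning adjacent pairs for equality, instead of comparing the list's length with the size of a set built from it.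
import Mathlib
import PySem

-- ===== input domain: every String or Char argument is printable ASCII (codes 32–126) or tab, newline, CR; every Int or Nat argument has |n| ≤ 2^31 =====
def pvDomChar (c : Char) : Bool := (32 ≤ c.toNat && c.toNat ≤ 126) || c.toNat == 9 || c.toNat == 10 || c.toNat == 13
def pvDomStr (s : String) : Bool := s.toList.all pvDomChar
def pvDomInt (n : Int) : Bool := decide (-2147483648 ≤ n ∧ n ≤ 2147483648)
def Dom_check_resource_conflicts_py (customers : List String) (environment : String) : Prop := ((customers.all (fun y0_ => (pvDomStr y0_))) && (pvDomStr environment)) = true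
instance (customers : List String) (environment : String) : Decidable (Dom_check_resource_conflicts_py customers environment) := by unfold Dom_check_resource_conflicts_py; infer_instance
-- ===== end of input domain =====

-- B detects duplicate 4-char prefixes by sorting them and scanning adjacent pairs, instead of A's length-vs-set-size comparison; same return value everywhere.

-- ===== PORT A =====
def check_resource_conflicts_py (customers : List String) (environment : String) : Bool :=
  let customer_prefixes : List String :=
    customers.foldl (fun acc customer => acc ++ [PySem.Str.slice customer none (some 4)]) []
  customer_prefixes.length == (PySem.Set.ofList customer_prefixes).length

-- ===== PORT B =====
def check_resource_conflicts_py_alt (customers : List String) (environment : String) : Bool :=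
  let prefixes : List String :=
    PySem.List.sorted (customers.map (fun customer => PySem.Str.slice customer none (some 4))) (fun s => s) false
  (prefixes.zip prefixes.tail).all (fun p => p.1 != p.2)

-- ===== PRECONDITION & SPEC =====
def Spec_check_resource_conflicts_py (customers : List String) (environment : String) (out : Bool) : Prop := out = check_resource_conflicts_py_alt customers environment
instance (customers : List String) (environment : String) (out : Bool) : Decidable (Spec_check_resource_conflicts_py customers environment out) := by unfold Spec_check_resource_conflicts_py; infer_instance

-- ===== CLAIM (what is proved, stated in full; the proofs are below) =====
def Claim_equal_check_resource_conflicts_py : Prop := ∀ (customers : List String) (environment : String), Dom_check_resource_conflicts_py customers environment → Spec_check_resource_conflicts_py customers environment (check_resource_conflicts_py customers environment)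

-- ===== LEMMAS AND PROOFS =====

-- set(xs) (first occurrences in order) is a sublist of xs
theorem pv_ofList_sublist {a : Type} [BEq a] [LawfulBEq a] (xs : List a) :
    (PySem.Set.ofList xs).Sublist xs := by
  induction xs using List.reverseRecOn with
  | nil => simp [PySem.Set.ofList]
  | append_singleton xs x ih =>
      rw [PySem.Set.ofList_append_singleton, PySem.Set.add_eq_ite]
      split_ifs with h
      · exact ih.trans (List.sublist_append_left xs [x])
      · exact List.Sublist.append ih (List.Sublist.refl [x])

-- len(xs) == len(set(xs)) decides Nodup
theorem pv_len_ofList_iff {a : Type} [BEq a] [LawfulBEq a] (xs : List a) :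
    (xs.length = (PySem.Set.ofList xs).length) ↔ xs.Nodup := by
  constructor
  · intro h
    have he := List.Sublist.eq_of_length (pv_ofList_sublist xs) h.symm
    rw [← he]
    exact PySem.Set.nodup_ofList xs
  · intro h
    rw [PySem.Set.ofList_eq_self_of_nodup xs h]

-- on a ≤-sorted list, "no equal adjacent pair" decides Nodup
theorem pv_adj_iff_nodup (l : List String) (hs : l.Pairwise (· ≤ ·)) :
    ((l.zip l.tail).all (fun p => p.1 != p.2) = true) ↔ l.Nodup := by
  induction l with
  | nil => simp
  | cons a t ih =>
      cases t with
      | nil => simp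
      | cons b u =>
          have hs' : (b :: u).Pairwise (· ≤ ·) := hs.tail
          have hab : a ≤ b := (List.pairwise_cons.mp hs).1 b (by simp)
          have hbu : ∀ y ∈ u, b ≤ y := fun y hy => (List.pairwise_cons.mp hs').1 y hy
          simp only [List.tail_cons, List.zip_cons_cons, List.all_cons, Bool.and_eq_true,
            bne_iff_ne, ne_eq, List.nodup_cons]
          simp only [List.tail_cons] at ih
          rw [ih hs']
          constructor
          · rintro ⟨hne, hnd⟩
            rcases List.nodup_cons.mp hnd with ⟨hbu', hu⟩
            refine ⟨?_, hbu', hu⟩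
            intro hmem
            rcases List.mem_cons.mp hmem with h | h
            · exact hne h
            · exact hne (le_antisymm hab (hbu a h))
          · rintro ⟨hmem, hbu', hu⟩
            exact ⟨fun h => hmem (by simp [h]), List.nodup_cons.mpr ⟨hbu', hu⟩⟩

-- ===== VERDICT (by name: the statement is the Claim_ definition above) =====
theorem check_resource_conflicts_py_spec : Claim_equal_check_resource_conflicts_py := by
  intro customers environment _
  unfold Spec_check_resource_conflicts_py check_resource_conflicts_py check_resource_conflicts_py_alt
  simp only [PySem.List.foldl_append_singleton_eq_map, List.nil_append]
  set ps := customers.map (fun customer => PySem.Str.slice customer none (some 4)) with hps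
  set ss := PySem.List.sorted ps (fun s => s) false with hss
  have hpair : ss.Pairwise (· ≤ ·) := PySem.List.sorted_pairwise ps (fun s => s)
  have hA : (ps.length == (PySem.Set.ofList ps).length) = true ↔ ps.Nodup := by
    rw [beq_iff_eq]; exact pv_len_ofList_iff ps
  have hB : ((ss.zip ss.tail).all (fun p => p.1 != p.2) = true) ↔ ps.Nodup := by
    rw [pv_adj_iff_nodup ss hpair]
    exact (PySem.List.sorted_perm ps (fun s => s) false).nodup_iff
  rw [Bool.eq_iff_iff, hA, hB]
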